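-- pv_equiv track=rewrite | github.com/yofn/pyacm | codeforces/math数学/1000/13A不同基的数位和.py | f
-- ===== SOURCE A (Python) =====
-- gcd = lambda a,b: a if b==0 else gcd(b,a%b)
--
-- def f(n):
--     s = 0
--     for i in range(2,n):
--         j = n
--         while j>0:
--             s += j%i
--             j  = j//i
--     g = gcd(s,n-2)
--     return '%d/%d'%(s//g,(n-2)//g)
-- ===== SOURCE B (Python) =====
-- def f(n):
--     s = 0
--     if n >= 3:
--         total = 0
--         i = 2
--         while i < n and i * i <= n:
--             t = 0
--             j = n // i
--             while j > 0:
--                 t += j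
--                 j //= i
--             total += (i - 1) * t
--             i += 1
--         l = i
--         while l <= n - 1:
--             q = n // l
--             r = min(n - 1, n // q)
--             total += q * ((l + r - 2) * (r - l + 1) // 2)
--             l = r + 1
--         s = (n - 2) * n - total
--     a, b = s, n - 2
--     while b:
--         a, b = b, a % b
--     g = a
--     return '%d/%d' % (s // g, (n - 2) // g)
-- ===== Notes on version B (the rewrite author's own statement) =====
-- stated objective: faster
-- what changed: Instead of running the O(log n) digit loop for every base 2..n-1, B uses digitsum_i(n) = n - (i-1)*sum_k floor(n/i^k): bases up to sqrt(n) get a short quotient loop, and all bases above sqrt(n) (where the sum is just floor(n/i)) are processed in O(sqrt(n)) blocks of constant floor(n/i) with a closed-form arithmetic series.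
import Mathlib
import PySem

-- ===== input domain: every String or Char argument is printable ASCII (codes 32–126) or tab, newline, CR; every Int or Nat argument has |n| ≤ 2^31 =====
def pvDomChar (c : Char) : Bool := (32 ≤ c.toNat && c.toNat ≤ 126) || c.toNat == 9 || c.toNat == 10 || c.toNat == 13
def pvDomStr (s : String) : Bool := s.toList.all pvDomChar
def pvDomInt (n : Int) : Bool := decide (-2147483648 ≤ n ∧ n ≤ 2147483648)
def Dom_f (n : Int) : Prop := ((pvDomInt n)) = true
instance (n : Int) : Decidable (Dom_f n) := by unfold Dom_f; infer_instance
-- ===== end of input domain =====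

-- B replaces A's per-base O(log n) digit loop over all n-2 bases by the identity
-- digitsum_i(n) = n - (i-1)·Σ_k ⌊n/i^k⌋ plus floor-division block grouping with a
-- closed-form arithmetic series for the O(√n) bases above √n (objective: faster).

-- ===== PORT A =====
-- gcd = lambda a,b: a if b==0 else gcd(b,a%b)
def gcdA (a b : Int) : Int :=
  if b = 0 then a else gcdA b (PySem.Int.mod a b)
termination_by b.natAbs
decreasing_by
  rename_i hb
  rcases lt_trichotomy b 0 with h | h | h
  · have := PySem.Int.mod_neg_bounds a h; omega
  · omega
  · have h1 := PySem.Int.mod_nonneg a h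
    have h2 := PySem.Int.mod_lt a h
    omega

-- A's inner 'while j>0: s += j%i ; j //= i'.  The '2 ≤ i' conjunct only makes the
-- recursion total (every call site has i ≥ 2, where Python's loop terminates).
def remLoop (i j s : Int) : Int :=
  if h : 0 < j ∧ 2 ≤ i then remLoop i (PySem.Int.floordiv j i) (s + PySem.Int.mod j i) else s
termination_by j.toNat
decreasing_by
  have h2 : (0:Int) < i := by omega
  have hlt : PySem.Int.floordiv j i < j := by
    rw [PySem.Int.floordiv_lt_iff_lt_mul h2]
    nlinarith [h.1, h.2]
  have hge : (0:Int) ≤ PySem.Int.floordiv j i := by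
    rw [PySem.Int.le_floordiv_iff_mul_le h2]; omega
  omega

def f (n : Int) : String :=
  let s := (PySem.List.pyRange 2 n 1).foldl (fun s i => remLoop i n s) 0
  let g := gcdA s (n - 2)
  PySem.Int.toStr (PySem.Int.floordiv s g) ++ "/" ++ PySem.Int.toStr (PySem.Int.floordiv (n - 2) g)

-- ===== PORT B =====
-- Source B's 'while b: a,b = b,a%b' rolled into the obvious tail recursion.
def gcdB (a b : Int) : Int :=
  if b = 0 then a else gcdB b (PySem.Int.mod a b)
termination_by b.natAbs
decreasing_by
  rename_i hb
  rcases lt_trichotomy b 0 with h | h | h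
  · have := PySem.Int.mod_neg_bounds a h; omega
  · omega
  · have h1 := PySem.Int.mod_nonneg a h
    have h2 := PySem.Int.mod_lt a h
    omega

-- Source B's 'while j>0: t += j ; j //= i' (the '2 ≤ i' conjunct only makes it total).
def innerQ (i j t : Int) : Int :=
  if h : 0 < j ∧ 2 ≤ i then innerQ i (PySem.Int.floordiv j i) (t + j) else t
termination_by j.toNat
decreasing_by
  have h2 : (0:Int) < i := by omega
  have hlt : PySem.Int.floordiv j i < j := by
    rw [PySem.Int.floordiv_lt_iff_lt_mul h2]
    nlinarith [h.1, h.2]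
  have hge : (0:Int) ≤ PySem.Int.floordiv j i := by
    rw [PySem.Int.le_floordiv_iff_mul_le h2]; omega
  omega

-- Source B's small-base loop; returns (final i, total).
def smallLoop (n i total : Int) : Int × Int :=
  if h : i < n ∧ i * i ≤ n then
    smallLoop n (i + 1) (total + (i - 1) * innerQ i (PySem.Int.floordiv n i) 0)
  else (i, total)
termination_by (n - i).toNat
decreasing_by omega

-- Source B's block loop over the large bases (the '2 ≤ l' conjunct only makes it
-- total; at the call site l ≥ 2 always holds).
def blockLoop (n l total : Int) : Int :=
  if h : 2 ≤ l ∧ l ≤ n - 1 then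
    let q := PySem.Int.floordiv n l
    let r := min (n - 1) (PySem.Int.floordiv n q)
    blockLoop n (r + 1) (total + q * PySem.Int.floordiv ((l + r - 2) * (r - l + 1)) 2)
  else total
termination_by (n - l).toNat
decreasing_by
  have hl : (0:Int) < l := by omega
  have hq : (1:Int) ≤ PySem.Int.floordiv n l := by
    rw [PySem.Int.le_floordiv_iff_mul_le hl]; omega
  have hr : l ≤ PySem.Int.floordiv n (PySem.Int.floordiv n l) := by
    rw [PySem.Int.le_floordiv_iff_mul_le (by omega)]
    have : PySem.Int.floordiv n l ≤ PySem.Int.floordiv n l := le_refl _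
    rw [PySem.Int.le_floordiv_iff_mul_le hl] at this
    nlinarith
  omega

def f_alt (n : Int) : String :=
  let s := if 3 ≤ n then
      let p := smallLoop n 2 0
      (n - 2) * n - blockLoop n p.1 p.2
    else 0
  let g := gcdB s (n - 2)
  PySem.Int.toStr (PySem.Int.floordiv s g) ++ "/" ++ PySem.Int.toStr (PySem.Int.floordiv (n - 2) g)


-- ===== PRECONDITION & SPEC =====
-- At n = 2 the Python A divides by gcd(0,0) = 0 and raises ZeroDivisionError; that
-- is the only excluded input (B raises there too).
def Pre_f (n : Int) : Prop := n ≠ 2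
instance (n : Int) : Decidable (Pre_f n) := by unfold Pre_f; infer_instance
def pvWitness_f : Int := 5

def Spec_f (n : Int) (out : String) : Prop := out = f_alt n
instance (n : Int) (out : String) : Decidable (Spec_f n out) := by unfold Spec_f; infer_instance

-- ===== CLAIM (what is proved, stated in full; the proofs are below) =====
def Claim_equal_f : Prop := ∀ (n : Int), Dom_f n → Pre_f n → Spec_f n (f n)

-- ===== LEMMAS AND PROOFS =====

-- The two gcd helpers are the same recursion.
theorem gcdB_eq_gcdA (a b : Int) : gcdB a b = gcdA a b := by
  induction hn : b.natAbs using Nat.strong_induction_on generalizing a b with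
  | _ n ih =>
    rw [gcdB.eq_def, gcdA.eq_def]
    split
    · rfl
    · rename_i hb
      subst hn
      refine ih (PySem.Int.mod a b).natAbs ?_ b _ rfl
      rcases lt_trichotomy b 0 with h | h | h
      · have := PySem.Int.mod_neg_bounds a h; omega
      · omega
      · have h1 := PySem.Int.mod_nonneg a h
        have h2 := PySem.Int.mod_lt a h
        omega


theorem fd_zero (i : Int) (hi : 0 < i) : PySem.Int.floordiv 0 i = 0 := by
  have a := (PySem.Int.floordiv_lt_iff_lt_mul hi (a := 0) (q := 1))
  have b := (PySem.Int.le_floordiv_iff_mul_le hi (a := 0) (q := 0))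
  omega

theorem fd_small (x i : Int) (hi : 0 < i) (h0 : 0 ≤ x) (hx : x < i) :
    PySem.Int.floordiv x i = 0 := by
  have a := (PySem.Int.floordiv_lt_iff_lt_mul hi (a := x) (q := 1))
  have b := (PySem.Int.le_floordiv_iff_mul_le hi (a := x) (q := 0))
  omega

theorem innerQ_stop (i j t : Int) (h : ¬ (0 < j ∧ 2 ≤ i)) : innerQ i j t = t := by
  rw [innerQ.eq_def, dif_neg h]

theorem innerQ_acc (i j t : Int) : innerQ i j t = t + innerQ i j 0 := by
  induction hn : j.toNat using Nat.strong_induction_on generalizing j t with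
  | _ n ih =>
    rw [innerQ.eq_def, innerQ.eq_def (t := 0)]
    split
    · rename_i h
      have h2 : (0:Int) < i := by omega
      have hlt : PySem.Int.floordiv j i < j := by
        rw [PySem.Int.floordiv_lt_iff_lt_mul h2]; nlinarith [h.1, h.2]
      have hge : (0:Int) ≤ PySem.Int.floordiv j i := by
        rw [PySem.Int.le_floordiv_iff_mul_le h2]; omega
      subst hn
      rw [ih (PySem.Int.floordiv j i).toNat (by omega) (PySem.Int.floordiv j i) (t + j) rfl,
          ih (PySem.Int.floordiv j i).toNat (by omega) (PySem.Int.floordiv j i) (0 + j) rfl]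
      ring
    · ring_nf


theorem remLoop_acc (i j s : Int) : remLoop i j s = s + remLoop i j 0 := by
  induction hn : j.toNat using Nat.strong_induction_on generalizing j s with
  | _ n ih =>
    rw [remLoop.eq_def, remLoop.eq_def (s := 0)]
    split
    · rename_i h
      have h2 : (0:Int) < i := by omega
      have hlt : PySem.Int.floordiv j i < j := by
        rw [PySem.Int.floordiv_lt_iff_lt_mul h2]; nlinarith [h.1, h.2]
      have hge : (0:Int) ≤ PySem.Int.floordiv j i := by
        rw [PySem.Int.le_floordiv_iff_mul_le h2]; omega
      subst hn
      rw [ih (PySem.Int.floordiv j i).toNat (by omega) (PySem.Int.floordiv j i) (s + PySem.Int.mod j i) rfl,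
          ih (PySem.Int.floordiv j i).toNat (by omega) (PySem.Int.floordiv j i) (0 + PySem.Int.mod j i) rfl]
      ring
    · ring_nf

theorem remLoop_eq (i j : Int) (hi : 2 ≤ i) (hj : 0 ≤ j) :
    remLoop i j 0 = j - (i - 1) * innerQ i (PySem.Int.floordiv j i) 0 := by
  induction hn : j.toNat using Nat.strong_induction_on generalizing j with
  | _ n ih =>
    have h2 : (0:Int) < i := by omega
    rw [remLoop.eq_def]
    split
    · rename_i h
      have hlt : PySem.Int.floordiv j i < j := by
        rw [PySem.Int.floordiv_lt_iff_lt_mul h2]; nlinarith [h.1, h.2]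
      have hge : (0:Int) ≤ PySem.Int.floordiv j i := by
        rw [PySem.Int.le_floordiv_iff_mul_le h2]; omega
      subst hn
      rw [remLoop_acc,
          ih (PySem.Int.floordiv j i).toNat (by omega) (PySem.Int.floordiv j i) hge rfl]
      have hid := PySem.Int.floordiv_mul_add_mod j i
      rw [innerQ.eq_def (j := PySem.Int.floordiv j i)]
      split
      · rename_i hfd
        rw [innerQ_acc i (PySem.Int.floordiv (PySem.Int.floordiv j i) i) (0 + PySem.Int.floordiv j i)]
        linear_combination hid
      · rename_i hfd
        have hz : PySem.Int.floordiv j i = 0 := by omega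
        rw [hz, fd_zero i h2, innerQ_stop i 0 0 (by omega)]
        linear_combination hid - i * hz
    · rename_i h
      have hz : j = 0 := by omega
      subst hz
      rw [fd_zero i h2, innerQ_stop i 0 0 (by omega)]
      ring

theorem innerQ_big (i n : Int) (hi : 2 ≤ i) (hn : 0 ≤ n) (hbig : n < i * i) :
    innerQ i (PySem.Int.floordiv n i) 0 = PySem.Int.floordiv n i := by
  have h2 : (0:Int) < i := by omega
  have hge : (0:Int) ≤ PySem.Int.floordiv n i := by
    rw [PySem.Int.le_floordiv_iff_mul_le h2]; omega
  have hlt : PySem.Int.floordiv n i < i := by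
    rw [PySem.Int.floordiv_lt_iff_lt_mul h2]; linarith
  rw [innerQ.eq_def]
  split
  · rename_i h
    rw [fd_small _ i h2 (by omega) hlt, innerQ_stop i 0 _ (by omega)]
    omega
  · omega


def sumTerms (g : Int → Int) (a b : Int) : Int := ((PySem.List.pyRange a b 1).map g).sum

theorem sumTerms_nil (g : Int → Int) (a b : Int) (h : b ≤ a) : sumTerms g a b = 0 := by
  unfold sumTerms
  rw [PySem.List.pyRange_one_eq_nil h]
  rfl

theorem sumTerms_cons (g : Int → Int) (a b : Int) (h : a < b) :
    sumTerms g a b = g a + sumTerms g (a + 1) b := by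
  unfold sumTerms
  rw [PySem.List.pyRange_one_cons h]
  simp

theorem sumTerms_snoc (g : Int → Int) (a b : Int) (h : a ≤ b) :
    sumTerms g a (b + 1) = sumTerms g a b + g b := by
  unfold sumTerms
  rw [PySem.List.pyRange_one_succ_right h]
  simp

theorem sumTerms_split (g : Int → Int) (a m b : Int) (h1 : a ≤ m) (h2 : m ≤ b) :
    sumTerms g a b = sumTerms g a m + sumTerms g m b := by
  unfold sumTerms
  rw [PySem.List.pyRange_one_append a m b h1 h2]
  simp

theorem sumTerms_congr (g h : Int → Int) (a b : Int)
    (hc : ∀ k, a ≤ k → k < b → g k = h k) : sumTerms g a b = sumTerms h a b := by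
  unfold sumTerms
  congr 1
  apply List.map_congr_left
  intro k hk
  rw [PySem.List.mem_pyRange_one] at hk
  exact hc k hk.1 hk.2

theorem sumTerms_arith (a b : Int) (h : a ≤ b) :
    2 * sumTerms (fun k => k - 1) a b = (a + b - 3) * (b - a) := by
  induction hd : (b - a).toNat generalizing b with
  | zero =>
    have hba : b = a := by omega
    subst hba
    rw [sumTerms_nil _ _ _ le_rfl]; ring
  | succ m ih =>
    obtain ⟨c, rfl⟩ : ∃ c, b = c + 1 := ⟨b - 1, by ring⟩
    have hb : a ≤ c := by omega
    rw [sumTerms_snoc _ _ _ hb]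
    have hc := ih c hb (by omega)
    linear_combination hc

theorem smallLoop_spec (n i total : Int) (hi : 2 ≤ i) :
    i ≤ (smallLoop n i total).1 ∧ (i ≤ n → (smallLoop n i total).1 ≤ n) ∧
    ((smallLoop n i total).1 < n → n < (smallLoop n i total).1 * (smallLoop n i total).1) ∧
    (smallLoop n i total).2 = total +
      sumTerms (fun k => (k - 1) * innerQ k (PySem.Int.floordiv n k) 0) i (smallLoop n i total).1 := by
  induction hd : (n - i).toNat generalizing i total with
  | zero =>
    rw [smallLoop.eq_def]
    have hcond : ¬ (i < n ∧ i * i ≤ n) := by intro h; omega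
    rw [dif_neg hcond]
    dsimp only
    exact ⟨le_rfl, by omega, by omega, by rw [sumTerms_nil _ _ _ le_rfl]; ring⟩
  | succ m ih =>
    rw [smallLoop.eq_def]
    split
    · rename_i h
      obtain ⟨h1, h2, h3, h4⟩ :=
        ih (i + 1) (total + (i - 1) * innerQ i (PySem.Int.floordiv n i) 0) (by omega) (by omega)
      refine ⟨by omega, fun _ => h2 (by omega), h3, ?_⟩
      have h5 : i < (smallLoop n (i + 1) (total + (i - 1) * innerQ i (PySem.Int.floordiv n i) 0)).1 := by
        omega
      rw [h4]
      conv_rhs => rw [sumTerms_cons _ _ _ h5]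
      ring
    · rename_i h
      dsimp only
      exact ⟨le_rfl, by omega, by omega, by rw [sumTerms_nil _ _ _ le_rfl]; ring⟩


theorem sumTerms_mul_right (g : Int → Int) (c a b : Int) :
    sumTerms (fun k => g k * c) a b = sumTerms g a b * c := by
  unfold sumTerms
  exact List.sum_map_mul_right (l := PySem.List.pyRange a b 1) (f := g) (r := c)

theorem blockLoop_spec (n l total : Int) (hl : 2 ≤ l) :
    blockLoop n l total = total + sumTerms (fun k => (k - 1) * PySem.Int.floordiv n k) l n := by
  induction hd : (n - l).toNat using Nat.strong_induction_on generalizing l total with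
  | _ m ih =>
    rw [blockLoop.eq_def]
    split
    · rename_i h
      have hl0 : (0:Int) < l := by omega
      set q := PySem.Int.floordiv n l with hqdef
      have hq1 : 1 ≤ q := by
        rw [hqdef, PySem.Int.le_floordiv_iff_mul_le hl0]; omega
      have hql : q * l ≤ n := by
        have : q ≤ PySem.Int.floordiv n l := le_of_eq hqdef
        rwa [PySem.Int.le_floordiv_iff_mul_le hl0] at this
      set r := min (n - 1) (PySem.Int.floordiv n q) with hrdef
      have hlr : l ≤ r := by
        rw [hrdef, le_min_iff]
        constructor
        · omega
        · rw [PySem.Int.le_floordiv_iff_mul_le (by omega : (0:Int) < q)]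
          nlinarith
      have hrn : r ≤ n - 1 := min_le_left _ _
      have hconst : ∀ k, l ≤ k → k < r + 1 → PySem.Int.floordiv n k = q := by
        intro k hk1 hk2
        have hk0 : (0:Int) < k := by omega
        have hup : PySem.Int.floordiv n k < q + 1 := by
          rw [PySem.Int.floordiv_lt_iff_lt_mul hk0]
          have hnl : n < (q + 1) * l := by
            have : PySem.Int.floordiv n l < q + 1 := by omega
            rwa [PySem.Int.floordiv_lt_iff_lt_mul hl0] at this
          nlinarith
        have hlo : q ≤ PySem.Int.floordiv n k := by
          rw [PySem.Int.le_floordiv_iff_mul_le hk0]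
          have hkr : k ≤ PySem.Int.floordiv n q := by omega
          rw [PySem.Int.le_floordiv_iff_mul_le (by omega : (0:Int) < q)] at hkr
          nlinarith
        omega
      rw [ih (n - (r + 1)).toNat (by omega) (r + 1) _ (by omega) rfl]
      have hsplit := sumTerms_split (fun k => (k - 1) * PySem.Int.floordiv n k) l (r + 1) n
        (by omega) (by omega)
      rw [hsplit]
      have hcg : sumTerms (fun k => (k - 1) * PySem.Int.floordiv n k) l (r + 1) =
          sumTerms (fun k => (k - 1) * q) l (r + 1) := by
        apply sumTerms_congr
        intro k hk1 hk2
        rw [hconst k hk1 hk2]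
      have hmul : sumTerms (fun k => (k - 1) * q) l (r + 1) =
          sumTerms (fun k => k - 1) l (r + 1) * q := sumTerms_mul_right _ q l (r + 1)
      have harith := sumTerms_arith l (r + 1) (by omega)
      have hfd : PySem.Int.floordiv ((l + r - 2) * (r - l + 1)) 2 =
          sumTerms (fun k => k - 1) l (r + 1) := by
        rw [PySem.Int.floordiv_eq_iff_of_pos (by omega : (0:Int) < 2)]
        constructor
        · nlinarith [harith]
        · nlinarith [harith]
      rw [hcg, hmul, hfd]
      ring
    · rename_i h
      rw [sumTerms_nil _ _ _ (by omega)]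
      ring


theorem foldl_remLoop (n : Int) (L : List Int) (acc : Int) :
    L.foldl (fun s i => remLoop i n s) acc = acc + (L.map (fun i => remLoop i n 0)).sum := by
  induction L generalizing acc with
  | nil => simp
  | cons x xs ih =>
    simp only [List.foldl_cons, List.map_cons, List.sum_cons]
    rw [ih, remLoop_acc]
    ring

theorem sumTerms_linear (n : Int) (t : Int → Int) (a b : Int) (h : a ≤ b) :
    sumTerms (fun k => n - t k) a b = (b - a) * n - sumTerms t a b := by
  induction hd : (b - a).toNat generalizing b with
  | zero =>
    have hba : b = a := by omega
    subst hba
    rw [sumTerms_nil _ _ _ le_rfl, sumTerms_nil _ _ _ le_rfl]; ring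
  | succ m ih =>
    obtain ⟨c, rfl⟩ : ∃ c, b = c + 1 := ⟨b - 1, by ring⟩
    have hb : a ≤ c := by omega
    rw [sumTerms_snoc _ _ _ hb, sumTerms_snoc _ _ _ hb, ih c hb (by omega)]
    ring

theorem s_eq (n : Int) :
    (PySem.List.pyRange 2 n 1).foldl (fun s i => remLoop i n s) 0 =
      (if 3 ≤ n then
        let p := smallLoop n 2 0
        (n - 2) * n - blockLoop n p.1 p.2
      else 0) := by
  by_cases hn3 : 3 ≤ n
  · rw [if_pos hn3]
    show _ = (n - 2) * n - blockLoop n (smallLoop n 2 0).1 (smallLoop n 2 0).2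
    have hn0 : (0:Int) ≤ n := by omega
    -- left side as a sumTerms
    rw [foldl_remLoop]
    have hA : ((PySem.List.pyRange 2 n 1).map (fun i => remLoop i n 0)).sum =
        sumTerms (fun i => remLoop i n 0) 2 n := rfl
    rw [hA]
    have hA2 : sumTerms (fun i => remLoop i n 0) 2 n =
        sumTerms (fun i => n - (i - 1) * innerQ i (PySem.Int.floordiv n i) 0) 2 n := by
      apply sumTerms_congr
      intro k hk1 hk2
      exact remLoop_eq k n hk1 hn0
    rw [hA2, sumTerms_linear n _ 2 n (by omega)]
    -- right side
    obtain ⟨h1, h2, h3, h4⟩ := smallLoop_spec n 2 0 le_rfl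
    set p := smallLoop n 2 0 with hp
    have hln : p.1 ≤ n := h2 (by omega)
    rw [blockLoop_spec n p.1 p.2 h1, h4]
    have hcg : sumTerms (fun k => (k - 1) * PySem.Int.floordiv n k) p.1 n =
        sumTerms (fun k => (k - 1) * innerQ k (PySem.Int.floordiv n k) 0) p.1 n := by
      apply sumTerms_congr
      intro k hk1 hk2
      have hbig : n < k * k := by
        have hpn : p.1 < n := by omega
        have := h3 hpn
        nlinarith
      rw [innerQ_big k n (by omega) hn0 hbig]
    rw [hcg]
    have hsp := sumTerms_split (fun k => (k - 1) * innerQ k (PySem.Int.floordiv n k) 0) 2 p.1 n h1 hln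
    linarith
  · rw [if_neg hn3]
    rw [PySem.List.pyRange_one_eq_nil (by omega : n ≤ 2)]
    rfl

-- ===== VERDICT (by name: the statement is the Claim_ definition above) =====
theorem f_spec : Claim_equal_f := by
  intro n _ _
  unfold Spec_f f f_alt
  simp only [s_eq n, gcdB_eq_gcdA]
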